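-- pv_equiv track=rewrite | github.com/yt-dlp/yt-dlp | yt_dlp/extractor/thirtydaysinger.py | _format_html_list
-- ===== SOURCE A (Python) =====
-- def _format_html_list(html):
--     replacements = {
--         '<ul>': '<br>',
--         '</ul': '<br>',
--         '<li>': '<br>- ',
--         '</li>': ''
--     }
--
--     for k, v in replacements.items():
--         html = html.replace(k, v)
--
--     return html
-- ===== SOURCE B (Python) =====
-- def _format_html_list(html):
--     # Single left-to-right scan replacing the four tokens in one pass
--     # (instead of four full-string replace passes).
--     out = []
--     i = 0
--     n = len(html)
--     while i < n:
--         if html.startswith('<ul>', i):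
--             out.append('<br>'); i += 4
--         elif html.startswith('</ul', i):
--             out.append('<br>'); i += 4
--         elif html.startswith('<li>', i):
--             out.append('<br>- '); i += 4
--         elif html.startswith('</li>', i):
--             i += 5
--         else:
--             out.append(html[i]); i += 1
--     return ''.join(out)
-- ===== Notes on version B (the rewrite author's own statement) =====
-- stated objective: alternative
-- what changed: Replaces four sequential full-string str.replace passes by a single left-to-right scan that matches the four tokens at each position and emits the replacement (or the character) once.
import Mathlib
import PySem

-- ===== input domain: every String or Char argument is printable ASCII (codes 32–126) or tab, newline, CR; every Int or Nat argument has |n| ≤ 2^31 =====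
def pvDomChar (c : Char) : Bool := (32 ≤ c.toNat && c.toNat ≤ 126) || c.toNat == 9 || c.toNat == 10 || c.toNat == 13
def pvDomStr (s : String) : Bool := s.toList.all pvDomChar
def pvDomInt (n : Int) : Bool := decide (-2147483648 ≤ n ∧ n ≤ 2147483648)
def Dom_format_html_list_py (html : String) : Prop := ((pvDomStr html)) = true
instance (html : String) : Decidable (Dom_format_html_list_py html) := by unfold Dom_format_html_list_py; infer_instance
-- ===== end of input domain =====

-- B replaces A's four sequential full-string replace passes by one left-to-right scan; same output (alternative decomposition).

-- ===== PORT A =====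
def format_html_list_py (html : String) : String :=
  let h1 := PySem.Str.replace html "<ul>" "<br>"
  let h2 := PySem.Str.replace h1 "</ul" "<br>"
  let h3 := PySem.Str.replace h2 "<li>" "<br>- "
  let h4 := PySem.Str.replace h3 "</li>" ""
  h4

-- ===== PORT B =====
-- Source B's single scan: at each position try the four tokens (in Source B's order), emit the replacement or the character
def onePassChars : List Char → List Char
  | [] => []
  | c :: t =>
    if ['<','u','l','>'].isPrefixOf (c :: t) then ['<','b','r','>'] ++ onePassChars (t.drop 3)
    else if ['<','/','u','l'].isPrefixOf (c :: t) then ['<','b','r','>'] ++ onePassChars (t.drop 3)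
    else if ['<','l','i','>'].isPrefixOf (c :: t) then ['<','b','r','>','-',' '] ++ onePassChars (t.drop 3)
    else if ['<','/','l','i','>'].isPrefixOf (c :: t) then onePassChars (t.drop 4)
    else c :: onePassChars t
termination_by l => l.length
decreasing_by all_goals simp

def format_html_list_py_alt (html : String) : String :=
  String.ofList (onePassChars html.toList)

-- ===== PRECONDITION & SPEC =====
def Spec_format_html_list_py (html : String) (out : String) : Prop := out = format_html_list_py_alt html
instance (html : String) (out : String) : Decidable (Spec_format_html_list_py html out) := by unfold Spec_format_html_list_py; infer_instance

-- ===== CLAIM (what is proved, stated in full; the proofs are below) =====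
def Claim_equal_format_html_list_py : Prop := ∀ (html : String), Dom_format_html_list_py html → Spec_format_html_list_py html (format_html_list_py html)

-- ===== LEMMAS AND PROOFS =====

-- structural version of PySem.Chars.replace for a nonempty pattern (proof-side only)
def repAux (old new : List Char) : List Char → List Char
  | [] => []
  | c :: t =>
    if old.isPrefixOf (c :: t) then new ++ repAux old new (t.drop (old.length - 1))
    else c :: repAux old new t
termination_by l => l.length
decreasing_by all_goals simp

theorem go_eq_repAux (old new : List Char) (hne : old ≠ []) :
    ∀ (fuel : Nat) (l acc : List Char), l.length ≤ fuel →
      PySem.Chars.replace.go old new fuel l acc = acc.reverse ++ repAux old new l := by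
  intro fuel
  induction fuel with
  | zero =>
    intro l acc h
    have : l = [] := by cases l <;> simp_all
    subst this
    simp [PySem.Chars.replace.go, repAux]
  | succ n ih =>
    intro l acc h
    cases l with
    | nil => simp [PySem.Chars.replace.go, repAux]
    | cons c t =>
      rw [PySem.Chars.replace.go]
      by_cases hp : old.isPrefixOf (c :: t)
      · have hol : 1 ≤ old.length := by cases old <;> simp_all
        have hdrop : (c :: t).drop old.length = t.drop (old.length - 1) := by
          cases old with
          | nil => simp_all
          | cons o os => simp
        rw [if_pos hp, ih _ _ (by simp at h ⊢; omega)]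
        · rw [repAux]
          rw [if_pos hp, hdrop]
          simp
      · rw [if_neg hp, ih _ _ (by simp at h ⊢; omega)]
        rw [repAux, if_neg hp]
        simp

theorem replace_eq_repAux (l old new : List Char) (hne : old ≠ []) :
    PySem.Chars.replace l old new = repAux old new l := by
  rw [PySem.Chars.replace]
  rw [if_neg (by simpa using hne)]
  simpa using go_eq_repAux old new hne l.length l [] le_rfl

-- a prefix made of non-'<' characters survives a replace whose replacement starts with '<'
theorem prefix_repAux_aux (old : List Char) (n' : List Char) :
    ∀ (n : Nat) (l : List Char), l.length ≤ n → ∀ w : List Char, (∀ c ∈ w, c ≠ '<') →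
      w.isPrefixOf (repAux old ('<' :: n') l) = true → w.isPrefixOf l = true := by
  intro n
  induction n with
  | zero =>
    intro l hl w hw h
    have : l = [] := by cases l <;> simp_all
    subst this
    rw [repAux] at h
    simpa using h
  | succ m ih =>
    intro l hl w hw h
    cases l with
    | nil => rw [repAux] at h; simpa using h
    | cons c t =>
      rw [repAux] at h
      by_cases hp : old.isPrefixOf (c :: t)
      · rw [if_pos hp] at h
        cases w with
        | nil => simp
        | cons a w' =>
          exfalso
          have h' := h
          simp [List.isPrefixOf] at h'
          have : a = '<' := h'.1
          exact (hw a (by simp)) this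
      · rw [if_neg hp] at h
        cases w with
        | nil => simp
        | cons a w' =>
          simp [List.isPrefixOf] at h ⊢
          refine ⟨h.1, ?_⟩
          have := ih t (by simp at hl; omega) w' (fun c hc => hw c (by simp [hc]))
            (by simpa [List.isPrefixOf_iff_prefix] using h.2)
          simpa [List.isPrefixOf_iff_prefix] using this

theorem prefix_repAux (old : List Char) (n' : List Char)
    (l w : List Char) (hw : ∀ c ∈ w, c ≠ '<')
    (h : w.isPrefixOf (repAux old ('<' :: n') l) = true) : w.isPrefixOf l = true :=
  prefix_repAux_aux old n' l.length l le_rfl w hw h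

theorem not_prefix_step (old : List Char) (n' : List Char) (w t : List Char)
    (hw : ∀ c ∈ w, c ≠ '<') (h : ¬ w.isPrefixOf t = true) :
    ¬ w.isPrefixOf (repAux old ('<' :: n') t) = true :=
  fun hq => h (prefix_repAux old n' t w hw hq)

theorem main_aux : ∀ (n : Nat) (l : List Char), l.length ≤ n →
    repAux ['<','/','l','i','>'] []
      (repAux ['<','l','i','>'] ['<','b','r','>','-',' ']
        (repAux ['<','/','u','l'] ['<','b','r','>']
          (repAux ['<','u','l','>'] ['<','b','r','>'] l))) = onePassChars l := by
  intro n
  induction n with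
  | zero =>
    intro l hl
    have : l = [] := by cases l <;> simp_all
    subst this
    simp [repAux, onePassChars]
  | succ m ih =>
    intro l hl
    by_cases h1 : ['<','u','l','>'].isPrefixOf l
    · rw [List.isPrefixOf_iff_prefix] at h1
      obtain ⟨t, rfl⟩ := h1
      have ht : t.length ≤ m := by simp at hl; omega
      simp [repAux, onePassChars, List.isPrefixOf, ih t ht]
    · by_cases h2 : ['<','/','u','l'].isPrefixOf l
      · rw [List.isPrefixOf_iff_prefix] at h2
        obtain ⟨t, rfl⟩ := h2
        have ht : t.length ≤ m := by simp at hl; omega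
        simp only [List.cons_append, List.nil_append] at h1 ⊢
        simp [repAux, onePassChars, List.isPrefixOf, ih t ht]
      · by_cases h3 : ['<','l','i','>'].isPrefixOf l
        · rw [List.isPrefixOf_iff_prefix] at h3
          obtain ⟨t, rfl⟩ := h3
          have ht : t.length ≤ m := by simp at hl; omega
          simp [repAux, onePassChars, List.isPrefixOf, ih t ht]
        · by_cases h4 : ['<','/','l','i','>'].isPrefixOf l
          · rw [List.isPrefixOf_iff_prefix] at h4
            obtain ⟨t, rfl⟩ := h4
            have ht : t.length ≤ m := by simp at hl; omega
            simp only [List.cons_append, List.nil_append] at h1 h2 h3 ⊢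
            simp [repAux, onePassChars, List.isPrefixOf, ih t ht]
          · cases l with
            | nil => simp [repAux, onePassChars]
            | cons c t =>
              have ht : t.length ≤ m := by simp at hl; omega
              by_cases hc : c = '<'
              · subst hc
                have n2 : ¬ (['/','u','l'].isPrefixOf t) = true := by
                  simpa [List.isPrefixOf] using h2
                have n3 : ¬ (['l','i','>'].isPrefixOf t) = true := by
                  simpa [List.isPrefixOf] using h3
                have n4 : ¬ (['/','l','i','>'].isPrefixOf t) = true := by
                  simpa [List.isPrefixOf] using h4
                have r1 : repAux ['<','u','l','>'] ['<','b','r','>'] ('<'::t)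
                    = '<' :: repAux ['<','u','l','>'] ['<','b','r','>'] t := by
                  rw [repAux, if_neg h1]
                have m2 : ¬ (['/','u','l'].isPrefixOf
                    (repAux ['<','u','l','>'] ['<','b','r','>'] t)) = true :=
                  not_prefix_step _ _ _ _ (by simp) n2
                have r2 : repAux ['<','/','u','l'] ['<','b','r','>']
                      ('<' :: repAux ['<','u','l','>'] ['<','b','r','>'] t)
                    = '<' :: repAux ['<','/','u','l'] ['<','b','r','>']
                        (repAux ['<','u','l','>'] ['<','b','r','>'] t) := by
                  rw [repAux, if_neg (by simpa [List.isPrefixOf] using m2)]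
                have m3 : ¬ (['l','i','>'].isPrefixOf
                    (repAux ['<','/','u','l'] ['<','b','r','>']
                      (repAux ['<','u','l','>'] ['<','b','r','>'] t))) = true :=
                  not_prefix_step _ _ _ _ (by simp)
                    (not_prefix_step _ _ _ _ (by simp) n3)
                have r3 : repAux ['<','l','i','>'] ['<','b','r','>','-',' ']
                      ('<' :: repAux ['<','/','u','l'] ['<','b','r','>']
                        (repAux ['<','u','l','>'] ['<','b','r','>'] t))
                    = '<' :: repAux ['<','l','i','>'] ['<','b','r','>','-',' ']
                        (repAux ['<','/','u','l'] ['<','b','r','>']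
                          (repAux ['<','u','l','>'] ['<','b','r','>'] t)) := by
                  rw [repAux, if_neg (by simpa [List.isPrefixOf] using m3)]
                have m4 : ¬ (['/','l','i','>'].isPrefixOf
                    (repAux ['<','l','i','>'] ['<','b','r','>','-',' ']
                      (repAux ['<','/','u','l'] ['<','b','r','>']
                        (repAux ['<','u','l','>'] ['<','b','r','>'] t)))) = true :=
                  not_prefix_step _ _ _ _ (by simp)
                    (not_prefix_step _ _ _ _ (by simp)
                      (not_prefix_step _ _ _ _ (by simp) n4))
                have r4 : repAux ['<','/','l','i','>'] []
                      ('<' :: repAux ['<','l','i','>'] ['<','b','r','>','-',' ']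
                        (repAux ['<','/','u','l'] ['<','b','r','>']
                          (repAux ['<','u','l','>'] ['<','b','r','>'] t)))
                    = '<' :: repAux ['<','/','l','i','>'] []
                        (repAux ['<','l','i','>'] ['<','b','r','>','-',' ']
                          (repAux ['<','/','u','l'] ['<','b','r','>']
                            (repAux ['<','u','l','>'] ['<','b','r','>'] t))) := by
                  rw [repAux, if_neg (by simpa [List.isPrefixOf] using m4)]
                rw [r1, r2, r3, r4, onePassChars,
                  if_neg h1, if_neg h2, if_neg h3, if_neg h4, ih t ht]
              · have nc : ∀ (w' s : List Char), ¬ (('<'::w').isPrefixOf (c::s)) = true := by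
                  intro w' s
                  simp [List.isPrefixOf]
                  intro h'
                  exact absurd h'.symm (by simpa using hc)
                have r1 : repAux ['<','u','l','>'] ['<','b','r','>'] (c::t)
                    = c :: repAux ['<','u','l','>'] ['<','b','r','>'] t := by
                  rw [repAux, if_neg h1]
                have r2 : ∀ X, repAux ['<','/','u','l'] ['<','b','r','>'] (c::X)
                    = c :: repAux ['<','/','u','l'] ['<','b','r','>'] X := by
                  intro X
                  rw [repAux, if_neg (nc _ _)]
                have r3 : ∀ X, repAux ['<','l','i','>'] ['<','b','r','>','-',' '] (c::X)
                    = c :: repAux ['<','l','i','>'] ['<','b','r','>','-',' '] X := by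
                  intro X
                  rw [repAux, if_neg (nc _ _)]
                have r4 : ∀ X, repAux ['<','/','l','i','>'] [] (c::X)
                    = c :: repAux ['<','/','l','i','>'] [] X := by
                  intro X
                  rw [repAux, if_neg (nc _ _)]
                rw [r1, r2, r3, r4, onePassChars,
                  if_neg h1, if_neg h2, if_neg h3, if_neg h4, ih t ht]

-- ===== VERDICT (by name: the statement is the Claim_ definition above) =====
theorem format_html_list_py_spec : Claim_equal_format_html_list_py := by
  intro html _
  show format_html_list_py html = format_html_list_py_alt html
  unfold format_html_list_py format_html_list_py_alt PySem.Str.replace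
  simp only [String.toList_ofList]
  rw [show ("<ul>" : String).toList = ['<','u','l','>'] from rfl,
      show ("</ul" : String).toList = ['<','/','u','l'] from rfl,
      show ("<li>" : String).toList = ['<','l','i','>'] from rfl,
      show ("</li>" : String).toList = ['<','/','l','i','>'] from rfl,
      show ("<br>" : String).toList = ['<','b','r','>'] from rfl,
      show ("<br>- " : String).toList = ['<','b','r','>','-',' '] from rfl,
      show ("" : String).toList = [] from rfl,
      replace_eq_repAux _ _ _ (by simp), replace_eq_repAux _ _ _ (by simp),
      replace_eq_repAux _ _ _ (by simp), replace_eq_repAux _ _ _ (by simp),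
      main_aux html.toList.length html.toList le_rfl]
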